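-- pv_equiv track=rewrite | github.com/catnlp/CatNER | bio2bmes.py | iob_bmes
-- ===== SOURCE A (Python) =====
-- def iob_bmes(tags):
--     """
--     IOB -> BMES
--     """
--     new_tags = []
--     for i, tag in enumerate(tags):
--         if tag == 'O':
--             new_tags.append(tag)
--         elif tag.split('-')[0] == 'B':
--             if i + 1 != len(tags) and \
--                tags[i + 1].split('-')[0] == 'I':
--                 new_tags.append(tag)
--             else:
--                 new_tags.append(tag.replace('B-', 'S-'))
--         elif tag.split('-')[0] == 'I':
--             if i + 1 < len(tags) and \
--                     tags[i + 1].split('-')[0] == 'I':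
--                 new_tags.append(tag)
--             else:
--                 new_tags.append(tag.replace('I-', 'E-'))
--         else:
--             raise Exception('Invalid IOB format!')
--     return new_tags
-- ===== SOURCE B (Python) =====
-- def iob_bmes(tags):
--     """
--     IOB -> BMES
--
--     Reverse single pass: walk the tags from the end keeping a flag that says
--     whether the tag just processed (the successor in original order) has
--     prefix 'I'; each tag is then finalized immediately, and the collected
--     output is reversed at the end.
--     """
--     out = []
--     next_is_I = False
--     for tag in reversed(tags):
--         if tag == 'O':
--             prefix = 'O'
--             out.append(tag)
--         else:
--             prefix = tag.split('-')[0]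
--             if prefix == 'B':
--                 out.append(tag if next_is_I else tag.replace('B-', 'S-'))
--             elif prefix == 'I':
--                 out.append(tag if next_is_I else tag.replace('I-', 'E-'))
--             else:
--                 raise Exception('Invalid IOB format!')
--         next_is_I = prefix == 'I'
--     out.reverse()
--     return out
-- ===== Notes on version B (the rewrite author's own statement) =====
-- stated objective: faster
-- what changed: Replaces A's index-based lookahead (tags[i+1] with two/three split() calls per element) by a reverse single pass that carries a 'next tag has prefix I' flag, splitting each tag exactly once and reversing the collected output at the end.
import Mathlib
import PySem

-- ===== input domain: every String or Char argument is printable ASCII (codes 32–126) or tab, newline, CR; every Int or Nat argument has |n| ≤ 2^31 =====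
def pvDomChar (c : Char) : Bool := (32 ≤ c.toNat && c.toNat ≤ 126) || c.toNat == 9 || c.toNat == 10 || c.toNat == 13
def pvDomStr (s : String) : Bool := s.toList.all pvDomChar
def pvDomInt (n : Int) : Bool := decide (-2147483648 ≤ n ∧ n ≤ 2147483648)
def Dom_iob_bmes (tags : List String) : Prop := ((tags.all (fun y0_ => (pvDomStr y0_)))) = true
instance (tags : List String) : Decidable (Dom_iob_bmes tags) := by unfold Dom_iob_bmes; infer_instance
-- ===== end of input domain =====

-- B replaces A's index-based lookahead (tags[i+1]) by a reverse single pass that carries a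
-- "next tag has prefix 'I'" flag, splitting each tag once instead of up to three times.

-- ===== PORT A =====
-- tag.split('-')[0]: split? is none only for an empty separator, and '-' is nonempty,
-- and split always yields a nonempty list, so neither .getD [] nor .headD "" is ever taken as default
def pvSplitHead (tag : String) : String := ((PySem.Str.split? tag "-").getD []).headD ""

-- the body of A's for-loop over enumerate(tags); new_tags is the accumulator
def pvBodyA (tags : List String) (new_tags : List String) (p : Int × String) : List String :=
  let i := p.1
  let tag := p.2
  if tag = "O" then new_tags ++ [tag]
  else if pvSplitHead tag = "B" then
    if i + 1 ≠ (tags.length : Int) ∧ pvSplitHead (PySem.List.pyGetD tags (i + 1) "") = "I" then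
      new_tags ++ [tag]
    else
      new_tags ++ [PySem.Str.replace tag "B-" "S-"]
  else if pvSplitHead tag = "I" then
    if i + 1 < (tags.length : Int) ∧ pvSplitHead (PySem.List.pyGetD tags (i + 1) "") = "I" then
      new_tags ++ [tag]
    else
      new_tags ++ [PySem.Str.replace tag "I-" "E-"]
  else
    -- Python raises Exception('Invalid IOB format!') here: outside Pre_iob_bmes
    new_tags ++ [tag]

def iob_bmes (tags : List String) : List String :=
  (PySem.List.enumerate tags).foldl (pvBodyA tags) []

-- ===== PORT B =====
-- one step of B's loop: the finalized tag for `tag` given whether the next (original-order)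
-- tag has prefix 'I', paired with the flag for the tag to this one's left
def pvAltStep (nextI : Bool) (tag : String) : String × Bool :=
  if tag = "O" then (tag, false)
  else
    let p := pvSplitHead tag
    if p = "B" then ((if nextI then tag else PySem.Str.replace tag "B-" "S-"), p == "I")
    else if p = "I" then ((if nextI then tag else PySem.Str.replace tag "I-" "E-"), p == "I")
    else (tag, p == "I")   -- Python raises Exception('Invalid IOB format!') here: outside Pre_iob_bmes

-- B's loop over reversed(tags), threading the flag and appending to out
def pvAltGo : List String → Bool → List String → List String
  | [], _, out => out
  | tag :: rest, nextI, out =>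
    let r := pvAltStep nextI tag
    pvAltGo rest r.2 (out ++ [r.1])

def iob_bmes_alt (tags : List String) : List String :=
  (pvAltGo tags.reverse false []).reverse

-- ===== PRECONDITION & SPEC =====
-- Pre_ excludes exactly the inputs on which A raises Exception('Invalid IOB format!'):
-- some tag is neither the string 'O' nor has split('-')[0] equal to 'B' or 'I'.
def Pre_iob_bmes (tags : List String) : Prop :=
  ∀ t ∈ tags, t = "O" ∨ pvSplitHead t = "B" ∨ pvSplitHead t = "I"
instance (tags : List String) : Decidable (Pre_iob_bmes tags) := by
  unfold Pre_iob_bmes; infer_instance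

def pvWitness_iob_bmes : List String := ["B-PER", "I-PER", "O", "B-LOC"]

def Spec_iob_bmes (tags : List String) (out : List String) : Prop := out = iob_bmes_alt tags
instance (tags : List String) (out : List String) : Decidable (Spec_iob_bmes tags out) := by
  unfold Spec_iob_bmes; infer_instance

-- ===== CLAIM (what is proved, stated in full; the proofs are below) =====
def Claim_equal_iob_bmes : Prop :=
  ∀ (tags : List String), Dom_iob_bmes tags → Pre_iob_bmes tags → Spec_iob_bmes tags (iob_bmes tags)

-- ===== LEMMAS AND PROOFS =====

def pvIsI (tag : String) : Bool := pvSplitHead tag == "I"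

-- the finalized tag, given the flag "next tag has prefix 'I'"
def pvEmit (nextI : Bool) (tag : String) : String :=
  if tag = "O" then tag
  else if pvSplitHead tag = "B" then (if nextI then tag else PySem.Str.replace tag "B-" "S-")
  else if pvSplitHead tag = "I" then (if nextI then tag else PySem.Str.replace tag "I-" "E-")
  else tag

-- flag seen by the head of the list (b = flag past the end)
def pvFlagOf : List String → Bool → Bool
  | [], b => b
  | r :: _, _ => pvIsI r

-- common functional specification of both programs
def pvSpecG : List String → Bool → List String
  | [], _ => []
  | t :: rest, b => pvEmit (pvFlagOf rest b) t :: pvSpecG rest b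

-- what B's left-to-right-over-reversed loop computes
def pvRevSpec : List String → Bool → List String
  | [], _ => []
  | t :: rest, b => pvEmit b t :: pvRevSpec rest (pvIsI t)

-- flag after the whole list has been processed by pvRevSpec
def pvEndFlag : List String → Bool → Bool
  | [], b => b
  | x :: xs, _ => pvEndFlag xs (pvIsI x)

lemma pvAltStep_eq (nextI : Bool) (tag : String) :
    pvAltStep nextI tag = (pvEmit nextI tag, pvIsI tag) := by
  unfold pvAltStep pvEmit pvIsI
  by_cases h : tag = "O"
  · subst h; simp; decide
  · simp [h]; split_ifs <;> simp

lemma pvAltGo_eq (l : List String) (b : Bool) (out : List String) :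
    pvAltGo l b out = out ++ pvRevSpec l b := by
  induction l generalizing b out with
  | nil => simp [pvAltGo, pvRevSpec]
  | cons t rest ih =>
    simp only [pvAltGo, pvRevSpec, pvAltStep_eq, ih, List.append_assoc, List.singleton_append]

lemma pvRevSpec_append (xs : List String) (t : String) (b : Bool) :
    pvRevSpec (xs ++ [t]) b = pvRevSpec xs b ++ [pvEmit (pvEndFlag xs b) t] := by
  induction xs generalizing b with
  | nil => simp [pvRevSpec, pvEndFlag]
  | cons x xs ih => simp [pvRevSpec, pvEndFlag, ih]

lemma pvEndFlag_append (xs : List String) (r : String) (b : Bool) :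
    pvEndFlag (xs ++ [r]) b = pvIsI r := by
  induction xs generalizing b with
  | nil => simp [pvEndFlag]
  | cons x xs ih => simp [pvEndFlag, ih]

lemma pvEndFlag_reverse (rest : List String) (b : Bool) :
    pvEndFlag rest.reverse b = pvFlagOf rest b := by
  cases rest with
  | nil => simp [pvEndFlag, pvFlagOf]
  | cons r rs => simp [List.reverse_cons, pvEndFlag_append, pvFlagOf]

lemma pvRevSpec_reverse (l : List String) (b : Bool) :
    (pvRevSpec l.reverse b).reverse = pvSpecG l b := by
  induction l generalizing b with
  | nil => simp [pvRevSpec, pvSpecG]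
  | cons t rest ih =>
    simp [List.reverse_cons, pvRevSpec_append, pvSpecG, pvEndFlag_reverse, ih]

lemma alt_eq_spec (tags : List String) : iob_bmes_alt tags = pvSpecG tags false := by
  unfold iob_bmes_alt
  rw [pvAltGo_eq, List.nil_append, pvRevSpec_reverse]

-- A side: length and lookahead facts for a suffix
lemma pv_len_fact {tags : List String} {k : Nat} {tag : String} {rest : List String}
    (h : tags.drop k = tag :: rest) : tags.length = k + 1 + rest.length := by
  have hk : ¬ tags.length ≤ k := by
    intro hle
    rw [List.drop_eq_nil_of_le hle] at h
    simp at h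
  have := congrArg List.length h
  simp [List.length_drop] at this
  omega

lemma pv_get_fact {tags : List String} {k : Nat} {tag r : String} {rest : List String}
    (h : tags.drop k = tag :: r :: rest) :
    PySem.List.pyGetD tags ((k : Int) + 1) "" = r := by
  have hcast : ((k : Int) + 1) = ((k + 1 : Nat) : Int) := by push_cast; ring
  rw [hcast, PySem.List.pyGetD_natCast]
  have h1 : tags[k + 1]? = some r := by
    have h2 : (tags.drop k)[1]? = tags[k + 1]? := List.getElem?_drop
    rw [h] at h2
    simpa using h2.symm
  simp [List.getD, h1]

lemma pvBodyA_eq {tags : List String} {k : Nat} {tag : String} {rest : List String}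
    (h : tags.drop k = tag :: rest) (acc : List String) :
    pvBodyA tags acc ((k : Int), tag) = acc ++ [pvEmit (pvFlagOf rest false) tag] := by
  have hlen := pv_len_fact h
  unfold pvBodyA pvEmit
  by_cases hO : tag = "O"
  · simp [hO]
  · simp only [hO, if_false]
    cases rest with
    | nil =>
      have hne : ¬ ((k : Int) + 1 ≠ (tags.length : Int) ∧
          pvSplitHead (PySem.List.pyGetD tags ((k : Int) + 1) "") = "I") := by
        intro ⟨h1, _⟩
        apply h1
        simp at hlen ⊢
        omega
      have hlt : ¬ ((k : Int) + 1 < (tags.length : Int) ∧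
          pvSplitHead (PySem.List.pyGetD tags ((k : Int) + 1) "") = "I") := by
        intro ⟨h1, _⟩
        simp at hlen
        omega
      simp [hne, hlt, pvFlagOf]
      split_ifs <;> simp
    | cons r rs =>
      have hget : pvSplitHead (PySem.List.pyGetD tags ((k : Int) + 1) "") = pvSplitHead r := by
        rw [pv_get_fact h]
      have hflag : pvFlagOf (r :: rs) false = (pvSplitHead r == "I") := by
        simp [pvFlagOf, pvIsI]
      have hne : ((k : Int) + 1 ≠ (tags.length : Int)) := by
        simp at hlen ⊢; omega
      have hlt : ((k : Int) + 1 < (tags.length : Int)) := by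
        simp at hlen ⊢; omega
      rw [hget, hflag]
      by_cases hI : pvSplitHead r = "I"
      · simp [hI, hne, hlt]
      · simp [hI, hne, hlt]
        split_ifs <;> simp

lemma pvFoldA (tags : List String) :
    ∀ (l : List String) (k : Nat) (acc : List String), tags.drop k = l →
      (PySem.List.enumerate l (k : Int)).foldl (pvBodyA tags) acc = acc ++ pvSpecG l false := by
  intro l
  induction l with
  | nil => intro k acc _; simp [PySem.List.enumerate_nil, pvSpecG]
  | cons tag rest ih =>
    intro k acc h
    have hdrop : tags.drop (k + 1) = rest := by
      have : tags.drop (k + 1) = (tags.drop k).drop 1 := by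
        rw [List.drop_drop]
      rw [this, h]
      rfl
    rw [PySem.List.enumerate_cons, List.foldl_cons]
    have hcast : ((k : Int) + 1) = ((k + 1 : Nat) : Int) := by push_cast; ring
    rw [hcast, ih (k + 1) _ hdrop, pvBodyA_eq h acc]
    simp [pvSpecG]

lemma a_eq_spec (tags : List String) : iob_bmes tags = pvSpecG tags false := by
  unfold iob_bmes
  have h0 : tags.drop 0 = tags := List.drop_zero
  have := pvFoldA tags tags 0 [] h0
  simpa [PySem.List.enumerate] using this

-- ===== VERDICT (by name: the statement is the Claim_ definition above) =====
theorem iob_bmes_spec : Claim_equal_iob_bmes := by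
  intro tags _ _
  unfold Spec_iob_bmes
  rw [a_eq_spec, alt_eq_spec]
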